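-- pv_equiv track=rewrite | github.com/shancock-va/for-fun | coding-interview-examples/company-v/piles_of_books.py | split_pile
-- ===== SOURCE A (Python) =====
-- def split_pile(original_pile_height, number_of_partitions):
--     '''
--     Splits a pile into a number_of_partitions piles and evenly fills them
--     '''
--     new_piles = []
--     for partition_number in range(0, number_of_partitions):
--         new_pile_size = original_pile_height // number_of_partitions
--         if original_pile_height % number_of_partitions > partition_number:
--             new_pile_size += 1
--         new_piles.append(new_pile_size)
--     return new_piles
-- ===== SOURCE B (Python) =====
-- def split_pile(original_pile_height, number_of_partitions):
--     # Greedy: repeatedly peel off the ceiling share of what remains and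
--     # shrink the problem (height and partition count both decrease).
--     piles = []
--     remaining = original_pile_height
--     parts_left = number_of_partitions
--     while parts_left > 0:
--         share = -(-remaining // parts_left)  # ceiling division
--         piles.append(share)
--         remaining -= share
--         parts_left -= 1
--     return piles
-- ===== Notes on version B (the rewrite author's own statement) =====
-- stated objective: alternative
-- what changed: Replaces A's loop, which recomputes the same floordiv/mod of the fixed inputs and branches per index, with a greedy shrinking recurrence: peel off the ceiling share of the remaining height and recurse on (remaining - share, parts - 1); no modulus or per-index comparison is used.
import Mathlib
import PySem

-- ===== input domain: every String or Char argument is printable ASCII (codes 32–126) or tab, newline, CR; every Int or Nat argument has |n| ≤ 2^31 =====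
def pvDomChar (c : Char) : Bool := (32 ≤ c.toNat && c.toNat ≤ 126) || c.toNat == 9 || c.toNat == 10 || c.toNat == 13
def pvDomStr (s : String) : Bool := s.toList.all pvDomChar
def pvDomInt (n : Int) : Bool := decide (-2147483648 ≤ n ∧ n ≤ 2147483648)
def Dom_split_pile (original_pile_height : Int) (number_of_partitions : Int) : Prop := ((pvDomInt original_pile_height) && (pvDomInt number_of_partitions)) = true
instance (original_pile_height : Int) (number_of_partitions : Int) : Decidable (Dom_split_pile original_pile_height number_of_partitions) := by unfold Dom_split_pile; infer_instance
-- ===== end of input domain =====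

-- B replaces A's per-index loop over fixed divisor/modulus with a greedy
-- shrinking recurrence that peels off the ceiling share of the remaining height
-- (alternative decomposition; same asymptotic cost).


-- ===== PORT A =====
def split_pile (original_pile_height : Int) (number_of_partitions : Int) : List Int :=
  (PySem.List.pyRange 0 number_of_partitions 1).foldl
    (fun new_piles partition_number =>
      let new_pile_size := PySem.Int.floordiv original_pile_height number_of_partitions
      let new_pile_size :=
        if PySem.Int.mod original_pile_height number_of_partitions > partition_number then
          new_pile_size + 1
        else new_pile_size
      new_piles ++ [new_pile_size]) []

-- ===== PORT B =====
-- while-loop of Source B as structural recursion on parts_left (a Nat counter)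
def split_pile_go (parts_left : Nat) (remaining : Int) : List Int :=
  match parts_left with
  | 0 => []
  | Nat.succ m =>
    let share := -(PySem.Int.floordiv (-remaining) ((m + 1 : Nat) : Int))
    share :: split_pile_go m (remaining - share)

def split_pile_alt (original_pile_height : Int) (number_of_partitions : Int) : List Int :=
  split_pile_go number_of_partitions.toNat original_pile_height

-- ===== PRECONDITION & SPEC =====
def Spec_split_pile (original_pile_height : Int) (number_of_partitions : Int) (out : List Int) : Prop := out = split_pile_alt original_pile_height number_of_partitions
instance (original_pile_height : Int) (number_of_partitions : Int) (out : List Int) : Decidable (Spec_split_pile original_pile_height number_of_partitions out) := by unfold Spec_split_pile; infer_instance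

-- ===== CLAIM (what is proved, stated in full; the proofs are below) =====
def Claim_equal_split_pile : Prop := ∀ (original_pile_height : Int) (number_of_partitions : Int), Dom_split_pile original_pile_height number_of_partitions → Spec_split_pile original_pile_height number_of_partitions (split_pile original_pile_height number_of_partitions)

-- ===== LEMMAS AND PROOFS =====

-- A's loop only appends: it is a map over the range.
theorem foldl_append_map {α β : Type} (f : α → β) :
    ∀ (l : List α) (acc : List β),
      l.foldl (fun acc i => acc ++ [f i]) acc = acc ++ l.map f := by
  intro l
  induction l with
  | nil => simp
  | cons x xs ih => intro acc; simp [List.foldl, ih]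

-- Closed form of A's per-index branch: min m r copies of q+1, then q's.
theorem map_range_ite (q r : Int) (hr : 0 ≤ r) :
    ∀ (m : Nat),
      (List.range m).map (fun (k : Nat) => if r > (k : Int) then q + 1 else q) =
        List.replicate (min m r.toNat) (q + 1) ++ List.replicate (m - r.toNat) q := by
  intro m
  induction m with
  | zero => simp
  | succ m ih =>
    rw [List.range_succ, List.map_append, ih]
    by_cases h : m < r.toNat
    · have h1 : r > (m : Int) := by omega
      have h3 : m + 1 - r.toNat = m - r.toNat := by omega
      have h4 : m - r.toNat = 0 := by omega
      have h5 : min m r.toNat = m := by omega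
      simp [h1, h3, h4, h5, ← List.replicate_succ']
    · have h1 : ¬ r > (m : Int) := by omega
      have h2 : min (m + 1) r.toNat = min m r.toNat := by omega
      have h3 : m + 1 - r.toNat = (m - r.toNat) + 1 := by omega
      simp [h1, h2, h3, ← List.replicate_succ']

-- Closed form of B's greedy recursion: if remaining = q*k + r with 0 ≤ r ≤ k,
-- it yields r copies of q+1 followed by k - r copies of q.
theorem split_pile_go_closed :
    ∀ (k : Nat) (h q r : Int), h = q * (k : Int) + r → 0 ≤ r → r ≤ (k : Int) →
      split_pile_go k h = List.replicate r.toNat (q + 1) ++ List.replicate (k - r.toNat) q := by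
  intro k
  induction k with
  | zero => intro h q r he h0 h1; simp [split_pile_go]; omega
  | succ m ih =>
    intro h q r he h0 h1
    have he' : h = q * (m : Int) + q + r := by push_cast at he; linarith
    by_cases hr : r = 0
    · have hshare : -(PySem.Int.floordiv (-h) ((m + 1 : Nat) : Int)) = q := by
        rw [PySem.Int.neg_floordiv_neg_eq_iff_of_pos (by positivity)]
        constructor <;> push_cast <;> nlinarith [he']
      rw [split_pile_go, hshare]
      have hrec : split_pile_go m (h - q) = List.replicate (0 : Int).toNat (q + 1) ++ List.replicate (m - (0 : Int).toNat) q :=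
        ih (h - q) q 0 (by omega) (le_refl 0) (by positivity)
      rw [hrec]
      simp [hr, List.replicate_succ]
    · have hrpos : 0 < r := by omega
      have hm1 : r ≤ (m : Int) + 1 := by push_cast at h1; omega
      have hshare : -(PySem.Int.floordiv (-h) ((m + 1 : Nat) : Int)) = q + 1 := by
        rw [PySem.Int.neg_floordiv_neg_eq_iff_of_pos (by positivity)]
        constructor <;> push_cast <;> nlinarith [he', hm1]
      rw [split_pile_go, hshare]
      have hrec : split_pile_go m (h - (q + 1)) =
          List.replicate (r - 1).toNat (q + 1) ++ List.replicate (m - (r - 1).toNat) q :=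
        ih (h - (q + 1)) q (r - 1) (by omega) (by omega) (by omega)
      rw [hrec]
      have h2 : r.toNat = (r - 1).toNat + 1 := by omega
      rw [h2]
      have h4 : m + 1 - ((r - 1).toNat + 1) = m - (r - 1).toNat := by omega
      rw [h4, List.replicate_succ]
      simp

-- ===== VERDICT (by name: the statement is the Claim_ definition above) =====
theorem split_pile_spec : Claim_equal_split_pile := by
  intro h n _
  unfold Spec_split_pile split_pile split_pile_alt
  by_cases hn : n ≤ 0
  · have hz : n.toNat = 0 := by omega
    simp [hz, PySem.List.pyRange_one_eq_nil hn, split_pile_go]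
  · have hnpos : 0 < n := by omega
    rw [PySem.List.pyRange_one, foldl_append_map]
    have hrlt := PySem.Int.mod_lt h hnpos
    have hrnn := PySem.Int.mod_nonneg h hnpos
    have hdecomp := PySem.Int.floordiv_mul_add_mod h n
    set q := PySem.Int.floordiv h n with hq
    set r := PySem.Int.mod h n with hrr
    have key : ((List.range (n - 0).toNat).map (fun (k : Nat) => (0 : Int) + k)).map
        (fun i => if r > i then q + 1 else q) =
        (List.range (n - 0).toNat).map (fun (k : Nat) => if r > (k : Int) then q + 1 else q) := by
      rw [List.map_map]; simp
    rw [List.nil_append, key, map_range_ite q r hrnn]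
    have hcast : ((n.toNat : Int)) = n := by omega
    rw [split_pile_go_closed n.toNat h q r (by rw [hcast]; linarith [hdecomp]) hrnn (by omega)]
    have hmin : min (n - 0).toNat r.toNat = r.toNat := by omega
    have hsub : (n - 0).toNat = n.toNat := by omega
    rw [hmin, hsub]
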